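-- pv_equiv track=rewrite | github.com/saenyakorn/2110101-COMP-PROG | P3/P3_04_Ascii.py | RSTRIP
-- ===== SOURCE A (Python) =====
-- def is_all_row_space(M,col):
--     return all([M[i][col]=='.' for i in range(len(M))])
--
-- def RSTRIP(M):
--     all_row = []
--     for i in range(len(M[0])):
--         all_row.append(is_all_row_space(M,i))
--     right = len(all_row)-1
--     while right>=0 and all_row[right]:
--         right-=1
--     right+=1
--     new_M = []
--     for i in range(len(M)):
--         new_M.append(M[i][:right])
--     return new_M
-- ===== SOURCE B (Python) =====
-- def RSTRIP(M):
--     width = len(M[0])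
--     right = 0
--     for row in M:
--         j = width
--         while j > 0 and row[j-1] == '.':
--             j -= 1
--         right = max(right, j)
--     return [row[:right] for row in M]
-- ===== Notes on version B (the rewrite author's own statement) =====
-- stated objective: simpler
-- what changed: One row-major pass keeping a running maximum of per-row trailing-dot trim lengths replaces A's column-major all-dot boolean array plus a right-to-left scan of it.
import Mathlib
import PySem

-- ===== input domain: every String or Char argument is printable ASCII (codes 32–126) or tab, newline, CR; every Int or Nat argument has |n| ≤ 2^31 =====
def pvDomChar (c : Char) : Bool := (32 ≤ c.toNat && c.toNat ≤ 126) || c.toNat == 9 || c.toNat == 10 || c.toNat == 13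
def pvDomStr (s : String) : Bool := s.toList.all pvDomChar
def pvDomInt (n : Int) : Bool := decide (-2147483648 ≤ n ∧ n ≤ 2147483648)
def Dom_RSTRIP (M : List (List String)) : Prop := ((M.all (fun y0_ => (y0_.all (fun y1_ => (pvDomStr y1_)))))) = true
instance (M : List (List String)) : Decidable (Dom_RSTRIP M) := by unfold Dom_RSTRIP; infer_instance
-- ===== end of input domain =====

-- B changes the decomposition (row-major running maximum instead of A's column-major
-- all-dot array + right scan); objective: simpler. Equivalence of return values on Pre_.

-- ===== PORT A =====
-- all([M[i][col]=='.' for i in range(len(M))]); out-of-range indexing (excluded by Pre_) defaults instead of raising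
def isAllRowSpace (M : List (List String)) (col : Nat) : Bool :=
  (List.range M.length).all (fun i => ((M[i]?.getD []).getD col "") == ".")

-- the `while right>=0 and all_row[right]: right-=1` loop
def scanRight (allRow : List Bool) (right : Int) : Int :=
  if h : 0 ≤ right ∧ ((PySem.List.pyGet? allRow right).getD false) = true then
    scanRight allRow (right - 1)
  else right
termination_by (right + 1).toNat
decreasing_by obtain ⟨h1, -⟩ := h; omega

def RSTRIP (M : List (List String)) : List (List String) :=
  let allRow := (List.range (M.headD []).length).map (fun i => isAllRowSpace M i)
  let right := scanRight allRow ((allRow.length : Int) - 1) + 1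
  M.map (fun row => PySem.List.slice row none (some right))

-- ===== PORT B =====
-- the `while j > 0 and row[j-1] == '.': j -= 1` loop of Source B
def trimLen (row : List String) : Nat → Nat
  | 0 => 0
  | j + 1 => if (row[j]?.getD "") == "." then trimLen row j else j + 1

def RSTRIP_alt (M : List (List String)) : List (List String) :=
  let width := (M.headD []).length
  let right := M.foldl (fun r row => max r (trimLen row width)) 0
  M.map (fun row => row.take right)

-- ===== PRECONDITION & SPEC =====
-- Pre_ excludes exactly the inputs where Python A raises IndexError: empty M, or a row
-- shorter than len(M[0]).
def Pre_RSTRIP (M : List (List String)) : Prop :=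
  M ≠ [] ∧ ∀ row ∈ M, (M.headD []).length ≤ row.length
instance (M : List (List String)) : Decidable (Pre_RSTRIP M) := by unfold Pre_RSTRIP; infer_instance

def pvWitness_RSTRIP : List (List String) := [["a", "."], [".", "."]]

def Spec_RSTRIP (M : List (List String)) (out : List (List String)) : Prop := out = RSTRIP_alt M
instance (M : List (List String)) (out : List (List String)) : Decidable (Spec_RSTRIP M out) := by unfold Spec_RSTRIP; infer_instance

-- ===== CLAIM (what is proved, stated in full; the proofs are below) =====
def Claim_equal_RSTRIP : Prop := ∀ (M : List (List String)), Dom_RSTRIP M → Pre_RSTRIP M → Spec_RSTRIP M (RSTRIP M)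

-- ===== LEMMAS AND PROOFS =====

-- abstract trailing-true counter: least k with p true on [k, j)
def cnt (p : Nat → Bool) : Nat → Nat
  | 0 => 0
  | j + 1 => if p j then cnt p j else j + 1

theorem cnt_le (p : Nat → Bool) (j : Nat) : cnt p j ≤ j := by
  induction j with
  | zero => simp [cnt]
  | succ j ih => simp only [cnt]; split <;> omega

theorem cnt_congr (p q : Nat → Bool) (j : Nat) (h : ∀ c < j, p c = q c) : cnt p j = cnt q j := by
  induction j with
  | zero => rfl
  | succ j ih =>
    simp only [cnt, h j (by omega)]
    rw [ih (fun c hc => h c (by omega))]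

theorem cnt_true (j : Nat) : cnt (fun _ => true) j = 0 := by
  induction j with
  | zero => rfl
  | succ j ih => simpa [cnt] using ih

theorem cnt_and (p q : Nat → Bool) (j : Nat) :
    cnt (fun c => p c && q c) j = max (cnt p j) (cnt q j) := by
  induction j with
  | zero => rfl
  | succ j ih =>
    have h1 := cnt_le p j
    have h2 := cnt_le q j
    by_cases hp : p j = true <;> by_cases hq : q j = true <;>
      simp [cnt, hp, hq, ih] <;> omega

theorem trimLen_eq_cnt (row : List String) (j : Nat) :
    trimLen row j = cnt (fun c => (row[c]?.getD "") == ".") j := by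
  induction j with
  | zero => rfl
  | succ j ih => simp only [trimLen, cnt, ih]

theorem scanRight_eq (l : List Bool) (j : Nat) :
    scanRight l ((j : Int) - 1) + 1
      = ((cnt (fun c => (PySem.List.pyGet? l (c : Int)).getD false) j : Nat) : Int) := by
  induction j with
  | zero =>
    rw [scanRight]
    norm_num [cnt]
  | succ j ih =>
    have hc : ((j + 1 : Nat) : Int) - 1 = (j : Int) := by push_cast; ring
    rw [hc, scanRight]
    by_cases hp : (PySem.List.pyGet? l (j : Int)).getD false = true
    · rw [dif_pos ⟨Int.natCast_nonneg j, hp⟩]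
      simp only [cnt, hp, if_pos]
      exact ih
    · rw [dif_neg (by exact fun h => hp h.2)]
      simp only [cnt, hp, Bool.false_eq_true, if_false]
      push_cast; ring

theorem isAllRowSpace_eq_all (M : List (List String)) (c : Nat) :
    isAllRowSpace M c = M.all (fun row => (row[c]?.getD "") == ".") := by
  unfold isAllRowSpace
  rw [Bool.eq_iff_iff]
  simp only [List.all_eq_true, List.mem_range]
  constructor
  · intro h row hrow
    obtain ⟨i, hi, rfl⟩ := List.mem_iff_getElem.mp hrow
    have := h i hi
    simpa [List.getElem?_eq_getElem hi] using this
  · intro h i hi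
    have hm : M[i] ∈ M := List.getElem_mem hi
    have := h _ hm
    simpa [List.getElem?_eq_getElem hi] using this

theorem foldl_max_pull {α : Type} (t : α → Nat) (l : List α) (a : Nat) :
    l.foldl (fun r x => max r (t x)) a = max a (l.foldl (fun r x => max r (t x)) 0) := by
  induction l generalizing a with
  | nil => simp
  | cons x xs ih =>
    simp only [List.foldl_cons]
    rw [ih (max a (t x)), ih (max 0 (t x))]
    omega

theorem cnt_allrows (M : List (List String)) (w : Nat) :
    cnt (fun c => M.all (fun row => (row[c]?.getD "") == ".")) w
      = M.foldl (fun r row => max r (trimLen row w)) 0 := by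
  induction M with
  | nil => simp [cnt_true]
  | cons row rest ih =>
    simp only [List.all_cons, List.foldl_cons]
    rw [cnt_and, ih, ← trimLen_eq_cnt]
    conv_rhs => rw [foldl_max_pull]
    omega

-- ===== VERDICT (by name: the statement is the Claim_ definition above) =====
theorem RSTRIP_spec : Claim_equal_RSTRIP := by
  intro M _ _
  unfold Spec_RSTRIP RSTRIP RSTRIP_alt
  simp only []
  set w := (M.headD []).length with hw
  have hlen : ((List.range w).map (fun i => isAllRowSpace M i)).length = w := by simp
  have hright :
      scanRight ((List.range w).map (fun i => isAllRowSpace M i))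
          ((((List.range w).map (fun i => isAllRowSpace M i)).length : Int) - 1) + 1
        = ((M.foldl (fun r row => max r (trimLen row w)) 0 : Nat) : Int) := by
    rw [hlen, scanRight_eq]
    congr 1
    rw [cnt_congr _ (fun c => M.all (fun row => (row[c]?.getD "") == ".")) w ?_,
        cnt_allrows]
    intro c hc
    show (PySem.List.pyGet? _ (c : Int)).getD false = M.all fun row => row[c]?.getD "" == "."
    rw [← isAllRowSpace_eq_all]
    simp [hc]
  rw [hright]
  refine List.map_congr_left (fun row _ => ?_)
  exact PySem.List.slice_to_natCast row _
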